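-- pv_equiv track=rewrite | github.com/ajmal017/AutoStock | src/strategies/mean_reversion.py | get_iteration_count
-- ===== SOURCE A (Python) =====
-- def get_iteration_count(long_term_minimum, long_term_maximum, short_term_minimum, short_term_maximum):
--     count = 0
--     for long_term in range(long_term_minimum, long_term_maximum + 1):
--         if long_term < short_term_maximum:
--             count += long_term - short_term_minimum
--         else:
--             count += short_term_maximum - short_term_minimum + 1
--     return count
-- ===== SOURCE B (Python) =====
-- def get_iteration_count(long_term_minimum, long_term_maximum, short_term_minimum, short_term_maximum):
--     # O(1) closed form: split the range at short_term_maximum into a linear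
--     # (arithmetic-series) part and a constant part.
--     hi = min(long_term_maximum, short_term_maximum - 1)
--     n1 = max(0, hi - long_term_minimum + 1)
--     linear = n1 * (long_term_minimum + hi) // 2 - n1 * short_term_minimum
--     n2 = max(0, long_term_maximum - max(long_term_minimum, short_term_maximum) + 1)
--     return linear + n2 * (short_term_maximum - short_term_minimum + 1)
-- ===== Notes on version B (the rewrite author's own statement) =====
-- stated objective: faster
-- what changed: Replaces the per-element loop over range(long_term_minimum, long_term_maximum+1) with a closed-form split at short_term_maximum: an arithmetic-series formula for the linear part plus a product for the constant part.
import Mathlib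
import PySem

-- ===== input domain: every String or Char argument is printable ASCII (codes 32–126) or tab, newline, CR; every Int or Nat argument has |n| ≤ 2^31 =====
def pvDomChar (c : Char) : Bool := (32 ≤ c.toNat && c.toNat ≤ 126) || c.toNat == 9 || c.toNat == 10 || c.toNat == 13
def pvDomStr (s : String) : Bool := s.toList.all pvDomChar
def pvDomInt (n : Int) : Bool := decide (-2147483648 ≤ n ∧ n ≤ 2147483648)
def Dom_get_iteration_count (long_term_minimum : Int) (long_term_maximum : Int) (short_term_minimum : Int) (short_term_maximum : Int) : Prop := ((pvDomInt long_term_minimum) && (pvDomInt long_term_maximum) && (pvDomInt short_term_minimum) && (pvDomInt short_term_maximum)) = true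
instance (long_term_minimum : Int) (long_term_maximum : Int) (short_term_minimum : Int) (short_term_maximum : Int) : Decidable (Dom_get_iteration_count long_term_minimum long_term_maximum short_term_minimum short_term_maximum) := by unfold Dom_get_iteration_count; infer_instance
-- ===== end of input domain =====

-- B replaces A's O(n) loop over the long-term range by an O(1) closed form:
-- arithmetic series for the part below short_term_maximum plus a constant part.

-- ===== PORT A =====
def get_iteration_count (long_term_minimum : Int) (long_term_maximum : Int) (short_term_minimum : Int) (short_term_maximum : Int) : Int :=
  (PySem.List.pyRange long_term_minimum (long_term_maximum + 1) 1).foldl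
    (fun count long_term =>
      if long_term < short_term_maximum then count + (long_term - short_term_minimum)
      else count + (short_term_maximum - short_term_minimum + 1)) 0

-- ===== PORT B =====
def get_iteration_count_alt (long_term_minimum : Int) (long_term_maximum : Int) (short_term_minimum : Int) (short_term_maximum : Int) : Int :=
  let hi := min long_term_maximum (short_term_maximum - 1)
  let n1 := max 0 (hi - long_term_minimum + 1)
  let linear := PySem.Int.floordiv (n1 * (long_term_minimum + hi)) 2 - n1 * short_term_minimum
  let n2 := max 0 (long_term_maximum - max long_term_minimum short_term_maximum + 1)
  linear + n2 * (short_term_maximum - short_term_minimum + 1)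

-- ===== PRECONDITION & SPEC =====
def Spec_get_iteration_count (long_term_minimum : Int) (long_term_maximum : Int) (short_term_minimum : Int) (short_term_maximum : Int) (out : Int) : Prop := out = get_iteration_count_alt long_term_minimum long_term_maximum short_term_minimum short_term_maximum
instance (long_term_minimum : Int) (long_term_maximum : Int) (short_term_minimum : Int) (short_term_maximum : Int) (out : Int) : Decidable (Spec_get_iteration_count long_term_minimum long_term_maximum short_term_minimum short_term_maximum out) := by unfold Spec_get_iteration_count; infer_instance

-- ===== CLAIM (what is proved, stated in full; the proofs are below) =====
def Claim_equal_get_iteration_count : Prop := ∀ (long_term_minimum : Int) (long_term_maximum : Int) (short_term_minimum : Int) (short_term_maximum : Int), Dom_get_iteration_count long_term_minimum long_term_maximum short_term_minimum short_term_maximum → Spec_get_iteration_count long_term_minimum long_term_maximum short_term_minimum short_term_maximum (get_iteration_count long_term_minimum long_term_maximum short_term_minimum short_term_maximum)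

-- ===== LEMMAS AND PROOFS =====

theorem pv_fd2_add (x k : Int) : PySem.Int.floordiv (x + 2 * k) 2 = PySem.Int.floordiv x 2 + k := by
  rw [PySem.Int.floordiv_eq_ediv_of_pos (show (0:Int) < 2 by norm_num), PySem.Int.floordiv_eq_ediv_of_pos (show (0:Int) < 2 by norm_num)]
  omega

theorem pv_loop_eq (sm sM a : Int) (n : Nat) :
    (PySem.List.pyRange a (a + n) 1).foldl
      (fun count long_term =>
        if long_term < sM then count + (long_term - sm)
        else count + (sM - sm + 1)) 0
    = get_iteration_count_alt a (a + n - 1) sm sM := by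
  induction n with
  | zero =>
    rw [show a + (0 : Nat) = a by push_cast; ring, PySem.List.pyRange_one_eq_nil le_rfl]
    simp only [List.foldl_nil, get_iteration_count_alt]
    have h1 : max 0 (min (a - 1) (sM - 1) - a + 1) = 0 := by omega
    have h2 : max 0 (a - 1 - max a sM + 1) = 0 := by omega
    rw [h1, h2]
    simp [PySem.Int.floordiv]
  | succ n ih =>
    rw [show a + ((n : Nat) + 1 : Nat) = (a + n) + 1 by push_cast; ring,
        PySem.List.pyRange_one_succ_right (by omega), List.foldl_append, List.foldl_cons,
        List.foldl_nil, ih]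
    simp only [get_iteration_count_alt]
    by_cases hlt : a + (n : Int) < sM
    · -- the new element a+n is in the linear part; the constant part is empty on both sides
      rw [if_pos hlt]
      have hhi : min (a + (n : Int) - 1) (sM - 1) = a + n - 1 := by omega
      have hhi' : min (a + (n : Int) + 1 - 1) (sM - 1) = a + n := by omega
      have hn2 : max 0 (a + (n : Int) - 1 - max a sM + 1) = 0 := by omega
      have hn2' : max 0 (a + (n : Int) + 1 - 1 - max a sM + 1) = 0 := by omega
      rw [hhi, hhi', hn2, hn2']
      have hn1 : max 0 (a + (n : Int) - 1 - a + 1) = (n : Int) := by omega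
      have hn1' : max 0 (a + (n : Int) - a + 1) = (n : Int) + 1 := by omega
      rw [hn1, hn1']
      have hsplit : ((n : Int) + 1) * (a + (a + n)) = (n : Int) * (a + (a + n - 1)) + 2 * (a + n) := by ring
      rw [hsplit, pv_fd2_add]
      ring
    · -- the new element a+n is in the constant part; the linear part is unchanged
      rw [if_neg hlt]
      have hhi : min (a + (n : Int) - 1) (sM - 1) = min (a + (n : Int) + 1 - 1) (sM - 1) := by omega
      have hn2' : max 0 (a + (n : Int) + 1 - 1 - max a sM + 1)
          = max 0 (a + (n : Int) - 1 - max a sM + 1) + 1 := by omega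
      rw [hhi, hn2']
      ring

theorem get_iteration_count_eq_alt (a b sm sM : Int) :
    get_iteration_count a b sm sM = get_iteration_count_alt a b sm sM := by
  unfold get_iteration_count
  by_cases h : b + 1 ≤ a
  · rw [PySem.List.pyRange_one_eq_nil h]
    simp only [List.foldl_nil, get_iteration_count_alt]
    have h1 : max 0 (min b (sM - 1) - a + 1) = 0 := by omega
    have h2 : max 0 (b - max a sM + 1) = 0 := by omega
    rw [h1, h2]
    simp [PySem.Int.floordiv]
  · have hb : b + 1 = a + ((b + 1 - a).toNat : Int) := by omega
    have hb' : b = a + ((b + 1 - a).toNat : Int) - 1 := by omega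
    rw [hb, pv_loop_eq, ← hb']

-- ===== VERDICT (by name: the statement is the Claim_ definition above) =====
theorem get_iteration_count_spec : Claim_equal_get_iteration_count := by
  intro a b sm sM _
  unfold Spec_get_iteration_count
  exact get_iteration_count_eq_alt a b sm sM
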